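-- pv_equiv track=rewrite | github.com/minjeongnew/algorithm-study | programmers/level2-2/stock_price.py | solution
-- ===== SOURCE A (Python) =====
-- def solution(prices):
--     s = [0]*len(prices)
--     for i in range(len(prices)):
--         for j in range(i+1, len(prices)):
--             if prices[i] > prices[j]:
--                 s[i] += 1
--                 break
--             else:
--                 s[i] += 1
--
--     return s
-- ===== SOURCE B (Python) =====
-- def solution(prices):
--     n = len(prices)
--     s = [0] * n
--     stack = []  # indices with prices nondecreasing bottom -> top
--     for i, p in enumerate(prices):
--         while stack and prices[stack[-1]] > p:
--             j = stack.pop()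
--             s[j] = i - j
--         stack.append(i)
--     for j in stack:
--         s[j] = n - 1 - j
--     return s
-- ===== Notes on version B (the rewrite author's own statement) =====
-- stated objective: faster
-- what changed: Replaced the per-index forward rescan (nested loops with break) by a single left-to-right pass over a monotonic stack of unresolved indices, resolving each index once when a lower price appears.
import Mathlib
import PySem

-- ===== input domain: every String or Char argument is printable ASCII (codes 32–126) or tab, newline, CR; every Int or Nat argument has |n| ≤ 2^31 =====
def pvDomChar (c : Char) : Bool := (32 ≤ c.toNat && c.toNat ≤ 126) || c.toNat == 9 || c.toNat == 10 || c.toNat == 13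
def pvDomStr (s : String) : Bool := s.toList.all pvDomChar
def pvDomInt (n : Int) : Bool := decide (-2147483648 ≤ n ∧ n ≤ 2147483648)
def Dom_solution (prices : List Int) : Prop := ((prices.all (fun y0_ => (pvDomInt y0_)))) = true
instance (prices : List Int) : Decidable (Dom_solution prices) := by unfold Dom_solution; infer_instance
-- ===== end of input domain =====

-- B replaces A's quadratic per-index rescan by a single monotonic-stack pass (asymptotically faster).

-- ===== PORT A =====
-- Literal port of A's nested loops: `break` is modelled by the Bool flag in the inner fold's
-- state; all indices read are in range, so prices.getD i 0 is exact for prices[i].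
def solution (prices : List Int) : List Int :=
  let n := prices.length
  (List.range n).foldl (fun s i =>
      ((List.range' (i+1) (n - (i+1))).foldl (fun (st : List Int × Bool) j =>
          if st.2 then st
          else if prices.getD i 0 > prices.getD j 0 then (st.1.set i (st.1.getD i 0 + 1), true)
          else (st.1.set i (st.1.getD i 0 + 1), false))
        (s, false)).1)
    (List.replicate n 0)

-- ===== PORT B =====
-- the `while stack and prices[stack[-1]] > p` loop of Source B (stack head = Python stack top)
def popLoop (prices : List Int) (i : Nat) (s : List Int) (stack : List Nat) : List Int × List Nat :=
  match stack with
  | [] => (s, [])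
  | j :: rest =>
    if prices.getD j 0 > prices.getD i 0 then
      popLoop prices i (s.set j ((i : Int) - (j : Int))) rest
    else (s, j :: rest)

def solution_alt (prices : List Int) : List Int :=
  let n := prices.length
  let st := (List.range n).foldl (fun (st : List Int × List Nat) i =>
      let st' := popLoop prices i st.1 st.2
      (st'.1, i :: st'.2))
    (List.replicate n 0, [])
  -- Python iterates the remaining stack bottom-to-top = our list reversed
  st.2.reverse.foldl (fun s j => s.set j ((n : Int) - 1 - (j : Int))) st.1

-- ===== PRECONDITION & SPEC =====
def Spec_solution (prices : List Int) (out : List Int) : Prop := out = solution_alt prices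
instance (prices : List Int) (out : List Int) : Decidable (Spec_solution prices out) := by unfold Spec_solution; infer_instance

-- ===== CLAIM (what is proved, stated in full; the proofs are below) =====
def Claim_equal_solution : Prop := ∀ (prices : List Int), Dom_solution prices → Spec_solution prices (solution prices)

-- ===== LEMMAS AND PROOFS =====

-- first index j > i with prices[j] < prices[i], within bounds
def fd (prices : List Int) (i : Nat) : Option Nat :=
  (List.range' (i+1) (prices.length - (i+1))).find? (fun j => decide (prices.getD j 0 < prices.getD i 0))

-- the common specification value: seconds until the price at i drops
def dur (prices : List Int) (i : Nat) : Int :=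
  match fd prices i with
  | some j => (j : Int) - (i : Int)
  | none => (prices.length : Int) - 1 - (i : Int)

-- j is still unresolved after the first k prices: no drop in (j, k)
def unres (prices : List Int) (k j : Nat) : Bool :=
  (List.range' (j+1) (k - (j+1))).all (fun m => decide (prices.getD j 0 ≤ prices.getD m 0))

def sv (prices : List Int) (k j : Nat) : Int :=
  if unres prices k j then 0
  else match fd prices j with
       | some m => (m : Int) - (j : Int)
       | none => 0

def sAt (prices : List Int) (k : Nat) : List Int := (List.range prices.length).map (sv prices k)

def stackAt (prices : List Int) (k : Nat) : List Nat :=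
  ((List.range k).filter (fun j => unres prices k j)).reverse

-- ---------- generic small lemmas ----------

theorem set_getD_self (s : List Int) (i : Nat) (h : i < s.length) :
    s.set i (s.getD i 0) = s := by
  apply List.ext_getElem
  · simp
  · intro idx h1 h2
    rw [List.getElem_set]
    split
    · next he => subst he; rw [List.getD_eq_getElem _ _ h]
    · rfl


theorem getD_set_self (s : List Int) (i : Nat) (a : Int) (h : i < s.length) :
    (s.set i a).getD i 0 = a := by
  rw [List.getD_eq_getElem _ _ (by simpa using h)]
  simp

theorem foldl_broken (prices : List Int) (i : Nat) (L : List Nat) (s : List Int) :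
    (L.foldl (fun (st : List Int × Bool) j =>
        if st.2 then st
        else if prices.getD i 0 > prices.getD j 0 then (st.1.set i (st.1.getD i 0 + 1), true)
        else (st.1.set i (st.1.getD i 0 + 1), false)) (s, true)) = (s, true) := by
  induction L generalizing s with
  | nil => rfl
  | cons j L ih => simp only [List.foldl_cons, if_true]; exact ih s

-- ---------- A side ----------

def cnt (prices : List Int) (i : Nat) : List Nat → Int
  | [] => 0
  | j :: L => if prices.getD i 0 > prices.getD j 0 then 1 else 1 + cnt prices i L

theorem innerA (prices : List Int) (i : Nat) (L : List Nat) :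
    ∀ s : List Int, i < s.length →
      (L.foldl (fun (st : List Int × Bool) j =>
          if st.2 then st
          else if prices.getD i 0 > prices.getD j 0 then (st.1.set i (st.1.getD i 0 + 1), true)
          else (st.1.set i (st.1.getD i 0 + 1), false)) (s, false)).1
        = s.set i (s.getD i 0 + cnt prices i L) := by
  induction L with
  | nil =>
    intro s hs
    simpa [cnt] using (set_getD_self s i hs).symm
  | cons j L ih =>
    intro s hs
    rw [List.foldl_cons]
    by_cases hc : prices.getD i 0 > prices.getD j 0
    · rw [if_neg (by simp), if_pos hc, foldl_broken]
      simp only [cnt]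
      rw [if_pos hc]
    · rw [if_neg (by simp), if_neg hc, ih _ (by simpa using hs), List.set_set]
      simp only [cnt, hc, if_false]
      congr 1
      rw [getD_set_self s i _ hs]
      ring

theorem cnt_range' (prices : List Int) (i : Nat) (k a : Nat) :
    cnt prices i (List.range' a k)
      = match (List.range' a k).find? (fun j => decide (prices.getD j 0 < prices.getD i 0)) with
        | some j => (j : Int) - (a : Int) + 1
        | none => (k : Int) := by
  induction k generalizing a with
  | zero => simp [cnt]
  | succ k ih =>
    rw [List.range'_succ]
    by_cases hc : prices.getD a 0 < prices.getD i 0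
    · rw [List.find?_cons_of_pos (by simpa using hc)]
      simp only [cnt]
      rw [if_pos hc]
      simp
    · rw [List.find?_cons_of_neg (by simpa using hc)]
      simp only [cnt]
      rw [if_neg hc, ih (a+1)]
      cases hfind : (List.range' (a+1) k).find? (fun j => decide (prices.getD j 0 < prices.getD i 0)) with
      | none => push_cast; ring
      | some j => push_cast; ring

theorem outerA (prices : List Int) :
    ∀ m, m ≤ prices.length →
      ((List.range m).foldl (fun s i =>
          ((List.range' (i+1) (prices.length - (i+1))).foldl (fun (st : List Int × Bool) j =>
              if st.2 then st
              else if prices.getD i 0 > prices.getD j 0 then (st.1.set i (st.1.getD i 0 + 1), true)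
              else (st.1.set i (st.1.getD i 0 + 1), false))
            (s, false)).1)
        (List.replicate prices.length 0))
      = (List.range prices.length).map (fun i => if i < m then dur prices i else 0) := by
  intro m
  induction m with
  | zero =>
    intro _
    apply List.ext_getElem
    · simp
    · intro idx h1 h2
      simp
  | succ m ih =>
    intro hm
    have hmlt : m < prices.length := hm
    rw [List.range_succ, List.foldl_append, List.foldl_cons, List.foldl_nil, ih (Nat.le_of_succ_le hm)]
    rw [innerA prices m _ _ (by simpa using hmlt)]
    have hgd : ((List.range prices.length).map (fun i => if i < m then dur prices i else 0)).getD m 0 = 0 := by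
      rw [List.getD_eq_getElem _ _ (by simpa using hmlt)]
      simp
    rw [hgd]
    have hcnt : cnt prices m (List.range' (m+1) (prices.length - (m+1))) = dur prices m := by
      rw [cnt_range']
      unfold dur fd
      cases hfind : (List.range' (m+1) (prices.length - (m+1))).find? (fun j => decide (prices.getD j 0 < prices.getD m 0)) with
      | none => rw [Nat.cast_sub hm]; push_cast; ring
      | some j => push_cast; ring
    rw [zero_add, hcnt]
    apply List.ext_getElem
    · simp
    · intro idx h1 h2
      have hidx : idx < prices.length := by simpa using h1
      rw [List.getElem_set]
      simp only [List.getElem_map, List.getElem_range]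
      split
      · next he => subst he; simp
      · next hne =>
        by_cases h3 : idx < m
        · simp [h3, Nat.lt_succ_of_lt h3]
        · have : ¬ idx < m + 1 := by omega
          simp [h3, this]

theorem solution_eq_map (prices : List Int) :
    solution prices = (List.range prices.length).map (dur prices) := by
  unfold solution
  rw [outerA prices prices.length le_rfl]
  apply List.map_congr_left
  intro i hi
  rw [if_pos (List.mem_range.mp hi)]

-- ---------- B side ----------

theorem popLoop_eq (prices : List Int) (i : Nat) :
    ∀ (st : List Nat) (s : List Int),
      popLoop prices i s st
        = ((st.takeWhile (fun j => decide (prices.getD i 0 < prices.getD j 0))).foldl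
             (fun s j => s.set j ((i : Int) - (j : Int))) s,
           st.dropWhile (fun j => decide (prices.getD i 0 < prices.getD j 0))) := by
  intro st
  induction st with
  | nil => intro s; rfl
  | cons j rest ih =>
    intro s
    unfold popLoop
    by_cases hc : prices.getD j 0 > prices.getD i 0
    · rw [if_pos hc, ih, List.takeWhile_cons_of_pos (by simpa using hc),
        List.dropWhile_cons_of_pos (by simpa using hc), List.foldl_cons]
    · rw [if_neg hc, List.takeWhile_cons_of_neg (by simpa using hc),
        List.dropWhile_cons_of_neg (by simpa using hc)]
      rfl

-- takeWhile/dropWhile coincide with filter when the predicate is monotone along the list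
theorem takeWhile_filter_of_pairwise {α : Type} (q : α → Bool) (L : List α)
    (h : L.Pairwise (fun a b => q b = true → q a = true)) :
    L.takeWhile q = L.filter q ∧ L.dropWhile q = L.filter (fun a => !q a) := by
  induction L with
  | nil => simp
  | cons x L ih =>
    rcases List.pairwise_cons.mp h with ⟨hx, hL⟩
    by_cases hq : q x = true
    · refine ⟨?_, ?_⟩
      · rw [List.takeWhile_cons_of_pos hq, List.filter_cons_of_pos hq, (ih hL).1]
      · rw [List.dropWhile_cons_of_pos hq, (ih hL).2, List.filter_cons_of_neg (by simp [hq])]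
    · have hall : ∀ b ∈ L, ¬ q b = true := fun b hb hqb => hq (hx b hb hqb)
      refine ⟨?_, ?_⟩
      · rw [List.takeWhile_cons_of_neg (by simpa using hq),
          List.filter_cons_of_neg (by simpa using hq)]
        rw [List.filter_eq_nil_iff.mpr hall]
      · rw [List.dropWhile_cons_of_neg (by simpa using hq),
          List.filter_cons_of_pos (by simpa using hq)]
        congr 1
        symm
        apply List.filter_eq_self.mpr
        intro b hb
        simpa using hall b hb

theorem foldl_set_length (v : Nat → Int) (L : List Nat) (s : List Int) :
    (L.foldl (fun s j => s.set j (v j)) s).length = s.length := by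
  induction L generalizing s with
  | nil => rfl
  | cons j L ih => simp [List.foldl_cons, ih]

theorem foldl_set_getD (v : Nat → Int) (L : List Nat) :
    ∀ (s : List Int) (idx : Nat), idx < s.length →
      (L.foldl (fun s j => s.set j (v j)) s).getD idx 0
        = if idx ∈ L then v idx else s.getD idx 0 := by
  induction L with
  | nil => intro s idx h; simp
  | cons j L ih =>
    intro s idx h
    rw [List.foldl_cons, ih _ idx (by simpa using h)]
    by_cases hmem : idx ∈ L
    · simp [hmem]
    · by_cases hji : j = idx
      · subst hji
        rw [if_neg hmem, getD_set_self s j (v j) h, if_pos (by simp)]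
      · have heq : (s.set j (v j)).getD idx 0 = s.getD idx 0 := by
          rw [List.getD_eq_getElem _ _ (by simpa using h), List.getD_eq_getElem _ _ h,
            List.getElem_set, if_neg hji]
        have hnc : idx ∉ j :: L := by
          rw [List.mem_cons]
          rintro (he | hm)
          · exact hji he.symm
          · exact hmem hm
        rw [if_neg hmem, heq, if_neg hnc]

theorem unres_of_ge (prices : List Int) (k j : Nat) (h : k ≤ j + 1) :
    unres prices k j = true := by
  unfold unres
  rw [Nat.sub_eq_zero_of_le h]
  simp

theorem unres_succ (prices : List Int) (k j : Nat) (hjk : j < k) :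
    unres prices (k+1) j
      = (unres prices k j && decide (prices.getD j 0 ≤ prices.getD k 0)) := by
  unfold unres
  have h1 : k + 1 - (j+1) = (k - (j+1)) + 1 := by omega
  have h2 : (j+1) + (k - (j+1)) = k := by omega
  rw [h1, List.range'_concat, List.all_append]
  simp [h2]

theorem price_mono (prices : List Int) (k j1 j2 : Nat) (h1 : j1 < j2) (h2 : j2 < k)
    (hu : unres prices k j1 = true) :
    prices.getD j1 0 ≤ prices.getD j2 0 := by
  unfold unres at hu
  rw [List.all_eq_true] at hu
  have := hu j2 (by rw [List.mem_range'_1]; omega)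
  simpa using this

theorem unres_length_iff_fd_none (prices : List Int) (idx : Nat) :
    fd prices idx = none ↔ unres prices prices.length idx = true := by
  unfold fd unres
  rw [List.find?_eq_none, List.all_eq_true]
  constructor
  · intro h m hm
    have := h m hm
    simp only [decide_eq_true_eq] at this ⊢
    omega
  · intro h m hm
    have := h m hm
    simp only [decide_eq_true_eq] at this ⊢
    omega

theorem fd_eq_some (prices : List Int) (idx k : Nat) (hik : idx < k)
    (hk : k < prices.length) (hu : unres prices k idx = true)
    (hdrop : prices.getD k 0 < prices.getD idx 0) :
    fd prices idx = some k := by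
  unfold fd
  have hsplit : List.range' (idx+1) (prices.length - (idx+1))
      = List.range' (idx+1) (k - (idx+1)) ++ List.range' k (prices.length - k) := by
    have h2 : (idx+1) + 1 * (k - (idx+1)) = k := by omega
    have h3 : (k - (idx+1)) + (prices.length - k) = prices.length - (idx+1) := by omega
    rw [← h3, ← List.range'_append, h2]
  rw [hsplit, List.find?_append]
  have hnone : (List.range' (idx+1) (k - (idx+1))).find?
      (fun j => decide (prices.getD j 0 < prices.getD idx 0)) = none := by
    rw [List.find?_eq_none]
    intro m hm
    unfold unres at hu
    rw [List.all_eq_true] at hu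
    have := hu m hm
    simp only [decide_eq_true_eq] at this ⊢
    omega
  have hrest : List.range' k (prices.length - k) = k :: List.range' (k+1) (prices.length - k - 1) := by
    conv_lhs => rw [show prices.length - k = (prices.length - k - 1) + 1 from by omega]
    rw [List.range'_succ]
  rw [hnone, hrest, List.find?_cons_of_pos (by simpa using hdrop)]
  rfl

theorem sv_length (prices : List Int) (k : Nat) : (sAt prices k).length = prices.length := by
  simp [sAt]

theorem sAt_getD (prices : List Int) (k idx : Nat) (h : idx < prices.length) :
    (sAt prices k).getD idx 0 = sv prices k idx := by
  unfold sAt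
  rw [List.getD_eq_getElem _ _ (by simpa using h)]
  simp

-- the stack is pairwise-monotone for the pop predicate
theorem stack_pairwise (prices : List Int) (k : Nat) :
    (stackAt prices k).Pairwise
      (fun a b => decide (prices.getD k 0 < prices.getD b 0) = true
        → decide (prices.getD k 0 < prices.getD a 0) = true) := by
  unfold stackAt
  rw [List.pairwise_reverse]
  have hsub : ((List.range k).filter (fun j => unres prices k j)).Pairwise (fun a b => a < b) :=
    List.Pairwise.sublist List.filter_sublist List.pairwise_lt_range
  have hmem : ∀ j ∈ (List.range k).filter (fun j => unres prices k j),
      j < k ∧ unres prices k j = true := by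
    intro j hj
    rw [List.mem_filter, List.mem_range] at hj
    exact hj
  refine List.Pairwise.imp_of_mem ?_ hsub
  intro a b ha hb hab
  simp only [decide_eq_true_eq]
  intro hq
  rcases hmem a ha with ⟨hak, hua⟩
  rcases hmem b hb with ⟨hbk, _⟩
  have := price_mono prices k a b hab hbk hua
  omega

theorem mem_stack_iff (prices : List Int) (k j : Nat) :
    j ∈ stackAt prices k ↔ j < k ∧ unres prices k j = true := by
  unfold stackAt
  rw [List.mem_reverse, List.mem_filter, List.mem_range]

theorem stackInv (prices : List Int) :
    ∀ k, k ≤ prices.length →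
      ((List.range k).foldl (fun (st : List Int × List Nat) i =>
          let st' := popLoop prices i st.1 st.2
          (st'.1, i :: st'.2)) (List.replicate prices.length 0, []))
        = (sAt prices k, stackAt prices k) := by
  intro k
  induction k with
  | zero =>
    intro _
    unfold sAt stackAt
    refine Prod.ext ?_ (by simp)
    apply List.ext_getElem
    · simp
    · intro idx h1 h2
      have : unres prices 0 idx = true := unres_of_ge prices 0 idx (by omega)
      simp [sv, this]
  | succ k ih =>
    intro hk
    rw [List.range_succ, List.foldl_append, List.foldl_cons, List.foldl_nil,
      ih (Nat.le_of_succ_le hk)]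
    have hkn : k < prices.length := hk
    simp only
    rw [popLoop_eq]
    obtain ⟨htake, hdrop⟩ := takeWhile_filter_of_pairwise _ _ (stack_pairwise prices k)
    refine Prod.ext ?_ ?_
    · -- s component
      simp only [htake]
      apply List.ext_getElem
      · rw [foldl_set_length, sv_length, sv_length]
      · intro idx h1 h2
        have hidx : idx < prices.length := by
          rw [foldl_set_length, sv_length] at h1; exact h1
        rw [← List.getD_eq_getElem _ 0 h1, ← List.getD_eq_getElem _ 0 h2,
          foldl_set_getD _ _ _ idx (by rw [sv_length]; exact hidx),
          sAt_getD _ _ _ hidx, sAt_getD _ _ _ hidx]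
        by_cases hmem : idx ∈ (stackAt prices k).filter
            (fun j => decide (prices.getD k 0 < prices.getD j 0))
        · rw [if_pos hmem]
          rw [List.mem_filter, mem_stack_iff] at hmem
          obtain ⟨⟨hik, hu⟩, hq⟩ := hmem
          have hq' : prices.getD k 0 < prices.getD idx 0 := by simpa using hq
          have hfd := fd_eq_some prices idx k hik hkn hu hq'
          have hu' : unres prices (k+1) idx = false := by
            rw [unres_succ prices k idx hik, hu, Bool.true_and, decide_eq_false_iff_not]
            omega
          simp [sv, hu', hfd]
        · rw [if_neg hmem]
          rw [List.mem_filter, mem_stack_iff] at hmem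
          push Not at hmem
          by_cases hu : unres prices k idx = true
          · -- still unresolved after k steps: sv k idx = 0; show sv (k+1) idx = 0
            have h0 : sv prices k idx = 0 := by simp [sv, hu]
            rw [h0]
            by_cases hik : idx < k
            · have hq := hmem ⟨hik, hu⟩
              have hle : prices.getD idx 0 ≤ prices.getD k 0 := by
                simpa using hq
              have : unres prices (k+1) idx = true := by
                rw [unres_succ prices k idx hik, hu]
                simpa using hle
              simp [sv, this]
            · have : unres prices (k+1) idx = true :=
                unres_of_ge prices (k+1) idx (by omega)
              simp [sv, this]
          · -- already resolved: unchanged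
            have hu' : unres prices k idx = false := by simpa using hu
            have hik : idx < k := by
              by_contra hge
              exact hu (unres_of_ge prices k idx (by omega))
            have hu'' : unres prices (k+1) idx = false := by
              rw [unres_succ prices k idx hik, hu']
              simp
            simp [sv, hu', hu'']
    · -- stack component
      simp only [hdrop]
      unfold stackAt
      rw [← List.filter_reverse]
      have : (List.range (k+1)).filter (fun j => unres prices (k+1) j)
          = ((List.range k).filter (fun j => unres prices (k+1) j)) ++ [k] := by
        rw [List.range_succ, List.filter_append]
        congr 1
        simp [unres_of_ge prices (k+1) k (by omega)]
      rw [this, List.reverse_append]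
      simp only [List.reverse_cons, List.reverse_nil, List.nil_append, List.singleton_append]
      congr 1
      rw [List.filter_reverse, List.filter_reverse, List.filter_filter]
      congr 1
      apply List.filter_congr
      intro j hj
      rw [List.mem_range] at hj
      rw [unres_succ prices k j hj]
      cases hu : unres prices k j
      · simp
      · simp only [Bool.and_true, Bool.true_and, ← decide_not]
        apply decide_eq_decide.mpr
        exact not_lt

theorem solution_alt_eq_map (prices : List Int) :
    solution_alt prices = (List.range prices.length).map (dur prices) := by
  dsimp only [solution_alt]
  rw [stackInv prices prices.length le_rfl]
  simp only
  unfold stackAt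
  rw [List.reverse_reverse]
  apply List.ext_getElem
  · rw [foldl_set_length, sv_length]
    simp
  · intro idx h1 h2
    have hidx : idx < prices.length := by
      rw [foldl_set_length, sv_length] at h1; exact h1
    rw [← List.getD_eq_getElem _ 0 h1, ← List.getD_eq_getElem _ 0 h2,
      foldl_set_getD _ _ _ idx (by rw [sv_length]; exact hidx),
      sAt_getD _ _ _ hidx]
    have hr : (List.map (dur prices) (List.range prices.length)).getD idx 0 = dur prices idx := by
      rw [List.getD_eq_getElem _ _ (by simpa using hidx)]
      simp
    rw [hr]
    by_cases hmem : idx ∈ (List.range prices.length).filter (fun j => unres prices prices.length j)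
    · rw [if_pos hmem]
      rw [List.mem_filter, List.mem_range] at hmem
      have hfd : fd prices idx = none := (unres_length_iff_fd_none prices idx).mpr hmem.2
      simp [dur, hfd]
    · rw [if_neg hmem]
      rw [List.mem_filter, List.mem_range] at hmem
      push Not at hmem
      have hu : unres prices prices.length idx = false := by
        have := hmem hidx
        simpa using this
      have hfd : fd prices idx ≠ none := by
        intro h
        rw [(unres_length_iff_fd_none prices idx).mp h] at hu
        simp at hu
      cases hfdc : fd prices idx with
      | none => exact absurd hfdc hfd
      | some m => simp [sv, dur, hu, hfdc]

-- ===== VERDICT (by name: the statement is the Claim_ definition above) =====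
theorem solution_spec : Claim_equal_solution := by
  intro prices _
  unfold Spec_solution
  rw [solution_eq_map, solution_alt_eq_map]
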